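-- pv_equiv track=rewrite | github.com/aydinmuhammed0534/turkish-grocery-product-scraper | mutlu_makarna_scraper.py | categorize_product
-- ===== SOURCE A (Python) =====
-- def categorize_product(url, alt=""):
--     """Ürünü kategoriye göre sınıflandırır"""
--     url_lower = url.lower()
--     alt_lower = alt.lower()
--
--     # Kategori eşleştirmeleri
--     if any(word in url_lower or word in alt_lower for word in ['sebzeli', 'sebze']):
--         return 'sebzeli'
--     elif any(word in url_lower or word in alt_lower for word in ['tam', 'bugday', 'buğday', 'kepek']):
--         return 'tam_bugday'
--     elif any(word in url_lower or word in alt_lower for word in ['couscous', 'kuskus']):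
--         return 'couscous'
--     elif any(word in url_lower or word in alt_lower for word in ['irmik']):
--         return 'irmik'
--     elif any(word in url_lower or word in alt_lower for word in ['mac', 'cheese']):
--         return 'mac_cheese'
--     elif any(word in url_lower or word in alt_lower for word in ['tel', 'arpa', 'yildiz', 'yıldız', 'sehriye', 'şehriye']):
--         return 'corbalik'
--     elif any(word in url_lower or word in alt_lower for word in ['spagetti', 'spaghetti', 'ince', 'uzun', 'orta']):
--         return 'uzun_kesmeler'
--     elif any(word in url_lower or word in alt_lower for word in ['penne', 'burgu', 'kelebek', 'midye', 'boncuk', 'fiyonk', 'yuksuk', 'yüksük']):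
--         return 'kisa_kesmeler'
--     else:
--         return 'klasik_urunler'
-- ===== SOURCE B (Python) =====
-- GROUPS = [
--     ['sebzeli', 'sebze'],
--     ['tam', 'bugday', 'buğday', 'kepek'],
--     ['couscous', 'kuskus'],
--     ['irmik'],
--     ['mac', 'cheese'],
--     ['tel', 'arpa', 'yildiz', 'yıldız', 'sehriye', 'şehriye'],
--     ['spagetti', 'spaghetti', 'ince', 'uzun', 'orta'],
--     ['penne', 'burgu', 'kelebek', 'midye', 'boncuk', 'fiyonk', 'yuksuk', 'yüksük'],
-- ]
-- NAMES = ['sebzeli', 'tam_bugday', 'couscous', 'irmik', 'mac_cheese',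
--          'corbalik', 'uzun_kesmeler', 'kisa_kesmeler']
-- # flat keyword -> priority-rank map (all keywords are distinct)
-- WORD_RANK = {w: i for i, ws in enumerate(GROUPS) for w in ws}
--
-- def categorize_product(url, alt=""):
--     """Single pass over the flat keyword->rank map, keeping the minimum
--     matched rank; no ordered group checks, no early exit."""
--     u = url.lower()
--     a = alt.lower()
--     best = None
--     for w, r in WORD_RANK.items():
--         if w in u or w in a:
--             best = r if best is None else min(best, r)
--     return NAMES[best] if best is not None else 'klasik_urunler'
-- ===== Notes on version B (the rewrite author's own statement) =====
-- stated objective: alternative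
-- what changed: Replaces the ordered if/elif cascade with early return by a single exhaustive pass over a flat keyword->priority-rank map, keeping the minimum matched rank and indexing a name table with it.
import Mathlib
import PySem

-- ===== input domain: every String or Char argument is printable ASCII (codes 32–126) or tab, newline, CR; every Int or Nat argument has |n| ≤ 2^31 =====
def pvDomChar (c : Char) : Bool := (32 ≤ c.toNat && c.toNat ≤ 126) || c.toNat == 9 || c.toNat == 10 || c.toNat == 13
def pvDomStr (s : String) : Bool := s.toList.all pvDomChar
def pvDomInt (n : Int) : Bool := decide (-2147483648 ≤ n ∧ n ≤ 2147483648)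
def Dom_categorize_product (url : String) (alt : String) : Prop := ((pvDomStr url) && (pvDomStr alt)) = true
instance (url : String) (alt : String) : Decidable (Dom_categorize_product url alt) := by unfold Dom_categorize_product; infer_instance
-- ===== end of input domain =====

-- B replaces A's ordered if/elif cascade by a single pass over a flat keyword->rank map keeping the minimum matched rank; return values proved equal.

-- ===== PORT A =====
-- 'word in url_lower or word in alt_lower' over the literal word lists, branches in source order
def categorize_product (url : String) (alt : String) : String :=
  let url_lower := PySem.Str.lower url
  let alt_lower := PySem.Str.lower alt
  let hit := fun (w : String) => PySem.Str.isIn w url_lower || PySem.Str.isIn w alt_lower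
  if ["sebzeli", "sebze"].any hit then "sebzeli"
  else if ["tam", "bugday", "buğday", "kepek"].any hit then "tam_bugday"
  else if ["couscous", "kuskus"].any hit then "couscous"
  else if ["irmik"].any hit then "irmik"
  else if ["mac", "cheese"].any hit then "mac_cheese"
  else if ["tel", "arpa", "yildiz", "yıldız", "sehriye", "şehriye"].any hit then "corbalik"
  else if ["spagetti", "spaghetti", "ince", "uzun", "orta"].any hit then "uzun_kesmeler"
  else if ["penne", "burgu", "kelebek", "midye", "boncuk", "fiyonk", "yuksuk", "yüksük"].any hit then "kisa_kesmeler"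
  else "klasik_urunler"

-- ===== PORT B =====
def pvGroups : List (List String) :=
  [["sebzeli", "sebze"],
   ["tam", "bugday", "buğday", "kepek"],
   ["couscous", "kuskus"],
   ["irmik"],
   ["mac", "cheese"],
   ["tel", "arpa", "yildiz", "yıldız", "sehriye", "şehriye"],
   ["spagetti", "spaghetti", "ince", "uzun", "orta"],
   ["penne", "burgu", "kelebek", "midye", "boncuk", "fiyonk", "yuksuk", "yüksük"]]

def pvNames : List String :=
  ["sebzeli", "tam_bugday", "couscous", "irmik", "mac_cheese",
   "corbalik", "uzun_kesmeler", "kisa_kesmeler"]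

-- WORD_RANK = {w: i for i, ws in enumerate(GROUPS) for w in ws}  (all keywords distinct)
def pvWordRank : List (String × Nat) :=
  pvGroups.zipIdx.flatMap (fun p => p.1.map (fun w => (w, p.2)))

def categorize_product_alt (url : String) (alt : String) : String :=
  let u := PySem.Str.lower url
  let a := PySem.Str.lower alt
  let best := pvWordRank.foldl
    (fun acc p =>
      if PySem.Str.isIn p.1 u || PySem.Str.isIn p.1 a then
        (match acc with | none => some p.2 | some b => some (min b p.2))
      else acc) none
  match best with
  | some r => pvNames.getD r "klasik_urunler"   -- NAMES[best]: best is always 0–7, in range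
  | none => "klasik_urunler"

-- ===== PRECONDITION & SPEC =====
def Spec_categorize_product (url : String) (alt : String) (out : String) : Prop := out = categorize_product_alt url alt
instance (url : String) (alt : String) (out : String) : Decidable (Spec_categorize_product url alt out) := by unfold Spec_categorize_product; infer_instance

-- ===== CLAIM (what is proved, stated in full; the proofs are below) =====
def Claim_equal_categorize_product : Prop := ∀ (url : String) (alt : String), Dom_categorize_product url alt → Spec_categorize_product url alt (categorize_product url alt)

-- ===== LEMMAS AND PROOFS =====

-- one constant-rank chunk of the fold: it fires iff some word of the chunk hits
theorem pv_chunk (hit : String → Bool) (ws : List String) (r : Nat) (acc : Option Nat) :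
    List.foldl
      (fun acc p =>
        if hit p.1 then (match acc with | none => some p.2 | some b => some (min b p.2)) else acc)
      acc (ws.map (fun w => (w, r)))
    = if ws.any hit then (match acc with | none => some r | some b => some (min b r)) else acc := by
  induction ws generalizing acc with
  | nil => simp
  | cons w t ih =>
    simp only [List.map_cons, List.foldl_cons, List.any_cons]
    by_cases hh : hit w = true <;>
      rw [ih] <;> cases acc <;> simp [hh, Nat.min_assoc, Nat.min_self]

-- abstracted over the per-word test: A's cascade equals B's min-rank fold
theorem pv_main (hit : String → Bool) :
    (if ["sebzeli", "sebze"].any hit then "sebzeli"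
     else if ["tam", "bugday", "buğday", "kepek"].any hit then "tam_bugday"
     else if ["couscous", "kuskus"].any hit then "couscous"
     else if ["irmik"].any hit then "irmik"
     else if ["mac", "cheese"].any hit then "mac_cheese"
     else if ["tel", "arpa", "yildiz", "yıldız", "sehriye", "şehriye"].any hit then "corbalik"
     else if ["spagetti", "spaghetti", "ince", "uzun", "orta"].any hit then "uzun_kesmeler"
     else if ["penne", "burgu", "kelebek", "midye", "boncuk", "fiyonk", "yuksuk", "yüksük"].any hit then "kisa_kesmeler"
     else "klasik_urunler")
    = (match pvWordRank.foldl
          (fun acc p =>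
            if hit p.1 then (match acc with | none => some p.2 | some b => some (min b p.2)) else acc)
          none with
       | some r => pvNames.getD r "klasik_urunler"
       | none => "klasik_urunler") := by
  have hW : pvWordRank =
      (["sebzeli", "sebze"].map (fun w => (w, (0 : Nat))))
      ++ (["tam", "bugday", "buğday", "kepek"].map (fun w => (w, (1 : Nat))))
      ++ (["couscous", "kuskus"].map (fun w => (w, (2 : Nat))))
      ++ (["irmik"].map (fun w => (w, (3 : Nat))))
      ++ (["mac", "cheese"].map (fun w => (w, (4 : Nat))))
      ++ (["tel", "arpa", "yildiz", "yıldız", "sehriye", "şehriye"].map (fun w => (w, (5 : Nat))))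
      ++ (["spagetti", "spaghetti", "ince", "uzun", "orta"].map (fun w => (w, (6 : Nat))))
      ++ (["penne", "burgu", "kelebek", "midye", "boncuk", "fiyonk", "yuksuk", "yüksük"].map (fun w => (w, (7 : Nat)))) := by
    rfl
  rw [hW]
  simp only [List.foldl_append]
  rw [pv_chunk, pv_chunk, pv_chunk, pv_chunk, pv_chunk, pv_chunk, pv_chunk, pv_chunk]
  by_cases h0 : (["sebzeli", "sebze"].any hit) = true
  · simp [h0, pvNames]
  by_cases h1 : (["tam", "bugday", "buğday", "kepek"].any hit) = true
  · simp [h0, h1, pvNames]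
  by_cases h2 : (["couscous", "kuskus"].any hit) = true
  · simp [h0, h1, h2, pvNames]
  by_cases h3 : (["irmik"].any hit) = true
  · simp [h0, h1, h2, h3, pvNames]
  by_cases h4 : (["mac", "cheese"].any hit) = true
  · simp [h0, h1, h2, h3, h4, pvNames]
  by_cases h5 : (["tel", "arpa", "yildiz", "yıldız", "sehriye", "şehriye"].any hit) = true
  · simp [h0, h1, h2, h3, h4, h5, pvNames]
  by_cases h6 : (["spagetti", "spaghetti", "ince", "uzun", "orta"].any hit) = true
  · simp [h0, h1, h2, h3, h4, h5, h6, pvNames]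
  by_cases h7 : (["penne", "burgu", "kelebek", "midye", "boncuk", "fiyonk", "yuksuk", "yüksük"].any hit) = true
  · simp [h0, h1, h2, h3, h4, h5, h6, h7, pvNames]
  simp [h0, h1, h2, h3, h4, h5, h6, h7]

-- ===== VERDICT (by name: the statement is the Claim_ definition above) =====
theorem categorize_product_spec : Claim_equal_categorize_product := by
  intro url alt _
  exact pv_main _
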